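-- pv_equiv track=rewrite | github.com/AP-MI-2021/lab-3-biaanton | main.py | get_longest_powers_of_k
-- ===== SOURCE A (Python) =====
-- from typing import List
--
-- def get_power_of_k(nr: int,k: int):
--         '''
--         Determina daca un numar se poate scrie ca x la puterea k
--         :param nr: numarul pe care il verificam
--         :return: valoarea 1 daca numarul se poate scrie ca x la puterea k, respectiv 0 in caz contrar
--         '''
--         if nr==1 and k==0: return 1
--         for i in range(2,nr):
--                 nou=1
--                 putere=0
--                 while nou<nr:
--                         nou=nou*i
--                         putere=putere+1
--                 if nou==nr and putere==k:
--                         return 1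
--         return 0
--
-- def get_longest_powers_of_k(lst: List[int], k:int) -> List[int]:
--         '''
--         Determina cea mai lunga subsecventa cu proprietatea ca toate numerele se pot scrie ca x la puterea k
--         :param lst: lista in care cautam subsecventa
--         :param k: cifra dupa care vom selecta subsecventa
--         :return: subsecventa cautata
--         '''
--         n=len(lst)
--         result=[]
--         for left in range(n):
--                 for right in range(left,n):
--                         all_powers_of_k=True
--                         for num in lst[left:right+1]:
--                                 if get_power_of_k(num,k)==0:
--                                         all_powers_of_k=False
--                                         break
--                         if all_powers_of_k:
--                                 if right-left+1>len(result):
--                                         result=lst[left:right+1]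
--         return result
-- ===== SOURCE B (Python) =====
-- from typing import List
--
-- def get_power_of_k(nr: int, k: int):
--     '''Same predicate as the original module helper.'''
--     if nr == 1 and k == 0:
--         return 1
--     for i in range(2, nr):
--         nou = 1
--         putere = 0
--         while nou < nr:
--             nou = nou * i
--             putere = putere + 1
--         if nou == nr and putere == k:
--             return 1
--     return 0
--
-- def get_longest_powers_of_k(lst: List[int], k: int) -> List[int]:
--     '''Single left-to-right scan: one predicate call per element, tracking the
--     current run of valid elements and the first longest run seen so far.'''
--     best: List[int] = []
--     current: List[int] = []
--     for num in lst:
--         if get_power_of_k(num, k) == 1: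
--             current = current + [num]
--             if len(current) > len(best):
--                 best = current
--         else:
--             current = []
--     return best
-- ===== Notes on version B (the rewrite author's own statement) =====
-- stated objective: faster
-- what changed: Replaced the enumeration of all O(n^2) windows (each re-scanning and re-testing every element, O(n^3) predicate calls) by a single left-to-right scan that calls the power predicate once per element, tracking the current run of valid elements and keeping the first longest run.
import Mathlib
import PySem

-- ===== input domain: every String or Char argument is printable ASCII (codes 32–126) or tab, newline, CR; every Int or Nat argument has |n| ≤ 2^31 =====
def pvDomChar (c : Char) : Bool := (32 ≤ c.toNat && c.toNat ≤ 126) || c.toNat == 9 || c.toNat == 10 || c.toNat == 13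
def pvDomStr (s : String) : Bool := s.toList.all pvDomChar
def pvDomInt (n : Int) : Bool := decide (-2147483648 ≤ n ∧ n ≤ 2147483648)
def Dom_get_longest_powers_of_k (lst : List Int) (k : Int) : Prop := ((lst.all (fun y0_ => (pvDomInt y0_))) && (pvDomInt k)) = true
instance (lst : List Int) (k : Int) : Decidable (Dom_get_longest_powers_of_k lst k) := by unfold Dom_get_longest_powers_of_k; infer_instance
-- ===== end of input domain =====

-- B replaces A's enumeration of all windows (O(n^3) predicate calls) by one linear scan
-- tracking the current run of valid elements and keeping the first longest run (return value only).

-- ===== PORT A =====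
-- while nou < nr: nou = nou*i; putere += 1   (guard's extra conjuncts 2 ≤ i, 1 ≤ nou only make
-- the recursion total; every actual call has i ≥ 2 from range(2,nr) and nou ≥ 1)
def powWhile (nr i nou putere : Int) : Int × Int :=
  if h : nou < nr ∧ 2 ≤ i ∧ 1 ≤ nou then
    powWhile nr i (nou * i) (putere + 1)
  else (nou, putere)
termination_by (nr - nou).toNat
decreasing_by
  have h1 : nou + 1 ≤ nou * i := by nlinarith [h.1, h.2.1, h.2.2]
  omega

-- for i in range(2, nr): … ; early 'return 1' ported as short-circuit recursion over the range list
def powLoop (nr k : Int) : List Int → Int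
  | [] => 0
  | i :: rest =>
    let st := powWhile nr i 1 0
    if st.1 == nr && st.2 == k then 1 else powLoop nr k rest

def get_power_of_k (nr k : Int) : Int :=
  if nr == 1 && k == 0 then 1 else powLoop nr k (PySem.List.pyRange 2 nr 1)

def get_longest_powers_of_k (lst : List Int) (k : Int) : List Int :=
  let n : Int := lst.length
  (PySem.List.pyRange 0 n 1).foldl (fun result left =>
    (PySem.List.pyRange left n 1).foldl (fun result right =>
      let window := PySem.List.slice lst (some left) (some (right + 1))
      -- for num in window: if get_power_of_k(num,k)==0: all_powers_of_k=False; break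
      let all_powers_of_k := window.all (fun num => !(get_power_of_k num k == 0))
      if all_powers_of_k = true then
        if right - left + 1 > (result.length : Int) then window else result
      else result) result) []

-- ===== PORT B =====
def bStep (k : Int) (st : List Int × List Int) (num : Int) : List Int × List Int :=
  if get_power_of_k num k == 1 then
    let current := st.2 ++ [num]
    if current.length > st.1.length then (current, current) else (st.1, current)
  else (st.1, [])

def get_longest_powers_of_k_alt (lst : List Int) (k : Int) : List Int :=
  (lst.foldl (bStep k) ([], [])).1

-- ===== PRECONDITION & SPEC =====
def Spec_get_longest_powers_of_k (lst : List Int) (k : Int) (out : List Int) : Prop := out = get_longest_powers_of_k_alt lst k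
instance (lst : List Int) (k : Int) (out : List Int) : Decidable (Spec_get_longest_powers_of_k lst k out) := by unfold Spec_get_longest_powers_of_k; infer_instance

-- ===== CLAIM (what is proved, stated in full; the proofs are below) =====
def Claim_equal_get_longest_powers_of_k : Prop := ∀ (lst : List Int) (k : Int), Dom_get_longest_powers_of_k lst k → Spec_get_longest_powers_of_k lst k (get_longest_powers_of_k lst k)

-- ===== LEMMAS AND PROOFS =====

-- Reference: fold over suffixes, replacing the accumulator by the valid run starting at the
-- current position whenever that run is strictly longer (= first longest run wins).
def gRef (p : Int → Bool) : List Int → List Int → List Int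
  | [], r => r
  | x :: xs, r =>
    gRef p xs (if ((x :: xs).takeWhile p).length > r.length then (x :: xs).takeWhile p else r)

-- A's inner loop abstracted: windows s.take (a+1), s.take (a+2), … (cnt of them)
def winFold (p : Int → Bool) (s : List Int) : Nat → Nat → List Int → List Int
  | 0, _, r => r
  | cnt + 1, a, r =>
    let w := s.take (a + 1)
    winFold p s cnt (a + 1)
      (if w.all p = true then (if a + 1 > r.length then w else r) else r)

-- B's step abstracted over the predicate
def runStep (p : Int → Bool) (st : List Int × List Int) (num : Int) : List Int × List Int :=
  if p num then
    let current := st.2 ++ [num]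
    if current.length > st.1.length then (current, current) else (st.1, current)
  else (st.1, [])

lemma powLoop01 (nr k : Int) : ∀ l : List Int, powLoop nr k l = 0 ∨ powLoop nr k l = 1 := by
  intro l
  induction l with
  | nil => left; rfl
  | cons i rest ih =>
    simp only [powLoop]
    split
    · right; rfl
    · exact ih

lemma pow01 (nr k : Int) : get_power_of_k nr k = 0 ∨ get_power_of_k nr k = 1 := by
  unfold get_power_of_k
  split
  · right; rfl
  · exact powLoop01 nr k _

lemma pred_eq (k num : Int) :
    (get_power_of_k num k == 1) = !(get_power_of_k num k == 0) := by
  rcases pow01 num k with h | h <;> simp [h]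

-- take j s is all-valid when j ≤ |takeWhile p s|
lemma take_all_of_le {p : Int → Bool} {s : List Int} {j : Nat}
    (h : j ≤ (s.takeWhile p).length) : (s.take j).all p = true := by
  have hpre : s.takeWhile p <+: s := List.takeWhile_prefix p
  obtain ⟨t, ht⟩ := hpre
  rw [List.all_eq_true]
  intro x hx
  have : x ∈ (s.takeWhile p).take j := by
    rw [← ht, List.take_append_of_le_length h] at hx
    exact hx
  exact List.mem_takeWhile_imp (List.mem_of_mem_take this)

lemma take_eq_of_le {p : Int → Bool} {s : List Int} {j : Nat}
    (h : j ≤ (s.takeWhile p).length) : s.take j = (s.takeWhile p).take j := by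
  obtain ⟨t, ht⟩ := List.takeWhile_prefix (l := s) p
  calc s.take j = (s.takeWhile p ++ t).take j := by rw [ht]
    _ = (s.takeWhile p).take j := List.take_append_of_le_length h

-- the element at index |takeWhile p s| of take j s (when j reaches it) fails p
lemma take_not_all {p : Int → Bool} {s : List Int} {j : Nat}
    (hlt : (s.takeWhile p).length < j) (hj : j ≤ s.length) :
    (s.take j).all p = false := by
  have hcls : (s.takeWhile p).length < s.length := lt_of_lt_of_le hlt hj
  have hd : s.dropWhile p ≠ [] := by
    intro hnil
    have hsplit := List.takeWhile_append_dropWhile (p := p) (l := s)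
    rw [hnil, List.append_nil] at hsplit
    have := congrArg List.length hsplit
    omega
  have hbad : p ((s.dropWhile p).head hd) = false := List.head_dropWhile_not p hd
  have hs0 : (s.takeWhile p ++ s.dropWhile p)[(s.takeWhile p).length]?
      = some ((s.dropWhile p).head hd) := by
    rw [List.getElem?_append_right (le_refl _), Nat.sub_self,
      ← List.head?_eq_getElem?, List.head?_eq_some_head hd]
  have hs0' : s[(s.takeWhile p).length]? = some ((s.dropWhile p).head hd) := by
    rw [← hs0]
    congr 1
    exact (List.takeWhile_append_dropWhile).symm
  have hs : s[(s.takeWhile p).length]'hcls = (s.dropWhile p).head hd := by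
    have hg := List.getElem?_eq_getElem hcls
    rw [hg] at hs0'
    exact Option.some.inj hs0'
  cases hall : (s.take j).all p with
  | false => rfl
  | true =>
    exfalso
    rw [List.all_eq_true] at hall
    have hmem : s[(s.takeWhile p).length]'hcls ∈ s.take j := by
      have hget : (s.take j)[(s.takeWhile p).length]'(by simp; omega) =
          s[(s.takeWhile p).length]'hcls := List.getElem_take
      rw [← hget]
      exact List.getElem_mem _
    have := hall _ hmem
    rw [hs, hbad] at this
    exact Bool.false_ne_true this

-- Characterization of A's inner loop
lemma winFold_spec (p : Int → Bool) (s : List Int) :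
    ∀ (cnt a : Nat) (r : List Int), a + cnt = s.length →
      winFold p s cnt a r =
        if a + 1 ≤ (s.takeWhile p).length ∧ (s.takeWhile p).length > r.length
        then s.takeWhile p else r := by
  intro cnt
  induction cnt with
  | zero =>
    intro a r ha
    have hcl : (s.takeWhile p).length ≤ s.length := (List.takeWhile_prefix p).length_le
    rw [winFold, if_neg]
    rintro ⟨h1, _⟩
    omega
  | succ cnt ih =>
    intro a r ha
    have hcl : (s.takeWhile p).length ≤ s.length := (List.takeWhile_prefix p).length_le
    rw [winFold]
    by_cases hle : a + 1 ≤ (s.takeWhile p).length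
    · have hall : (s.take (a + 1)).all p = true := take_all_of_le hle
      rw [if_pos hall]
      have hlen : (s.take (a + 1)).length = a + 1 := by
        rw [List.length_take]; omega
      by_cases hr : a + 1 > r.length
      · rw [if_pos hr, ih (a + 1) _ (by omega)]
        rw [hlen]
        by_cases h2 : a + 1 + 1 ≤ (s.takeWhile p).length
        · rw [if_pos ⟨h2, by omega⟩, if_pos ⟨hle, by omega⟩]
        · have hcleq : (s.takeWhile p).length = a + 1 := by omega
          rw [if_neg (by omega), if_pos ⟨hle, by omega⟩]
          rw [take_eq_of_le (le_of_eq hcleq.symm), ← hcleq, List.take_length]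
      · rw [if_neg hr, ih (a + 1) _ (by omega)]
        by_cases h2 : (s.takeWhile p).length > r.length
        · rw [if_pos ⟨by omega, h2⟩, if_pos ⟨hle, h2⟩]
        · rw [if_neg (by tauto), if_neg (by tauto)]
    · have hall : (s.take (a + 1)).all p = false :=
        take_not_all (by omega) (by omega)
      rw [if_neg (by simp [hall]), ih (a + 1) _ (by omega)]
      rw [if_neg (by omega), if_neg (by omega)]

-- B over an all-valid block
lemma foldl_runStep_valid (p : Int → Bool) :
    ∀ (c : List Int) (best cur : List Int),
      (∀ x ∈ c, p x = true) → cur.length ≤ best.length →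
      List.foldl (runStep p) (best, cur) c =
        (if best.length < cur.length + c.length then cur ++ c else best, cur ++ c) := by
  intro c
  induction c with
  | nil =>
    intro best cur _ hlen
    simp only [List.foldl_nil, List.length_nil, Nat.add_zero, List.append_nil]
    rw [if_neg (by omega)]
  | cons x c' ih =>
    intro best cur hval hlen
    have hx : p x = true := hval x (by simp)
    rw [List.foldl_cons, runStep, if_pos hx]
    dsimp only
    have hlx : (cur ++ [x]).length = cur.length + 1 := by simp
    have hlc : (x :: c').length = c'.length + 1 := by simp
    by_cases hpos : (cur ++ [x]).length > best.length
    · rw [if_pos hpos, ih _ _ (fun y hy => hval y (by simp [hy])) (le_refl _)]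
      have hgl : best.length < cur.length + (x :: c').length := by omega
      rw [if_pos hgl]
      simp only [Prod.mk.injEq]
      refine ⟨?_, by simp⟩
      by_cases hc : (cur ++ [x]).length < (cur ++ [x]).length + c'.length
      · rw [if_pos hc]; simp
      · rw [if_neg hc]
        have hc0 : c' = [] := by
          rw [← List.length_eq_zero_iff]
          omega
        subst hc0; simp
    · rw [if_neg hpos, ih _ _ (fun y hy => hval y (by simp [hy])) (by omega)]
      have hiff : (best.length < (cur ++ [x]).length + c'.length) =
          (best.length < cur.length + (x :: c').length) := by
        simp only [eq_iff_iff]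
        constructor <;> (intro; omega)
      simp only [hiff, Prod.mk.injEq]
      refine ⟨?_, by simp⟩
      by_cases hc : best.length < cur.length + (x :: c').length
      · rw [if_pos hc, if_pos hc]; simp
      · rw [if_neg hc, if_neg hc]

-- gRef over an all-valid block followed by an invalid boundary
lemma gRef_valid_block (p : Int → Bool) :
    ∀ (c ys r : List Int), (∀ x ∈ c, p x = true) → ys.takeWhile p = [] →
      gRef p (c ++ ys) r = gRef p ys (if c.length > r.length then c else r) := by
  intro c
  induction c with
  | nil =>
    intro ys r _ _
    simp only [List.nil_append, List.length_nil]
    rw [if_neg (by omega)]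
  | cons x c' ih =>
    intro ys r hval hys
    have hx : p x = true := hval x (by simp)
    have htw : ((x :: c') ++ ys).takeWhile p = x :: c' := by
      rw [List.takeWhile_append_of_pos hval, hys, List.append_nil]
    rw [List.cons_append, gRef, ← List.cons_append, htw]
    rw [ih ys _ (fun y hy => hval y (by simp [hy])) hys]
    congr 1
    by_cases hr : (x :: c').length > r.length
    · rw [if_pos hr, if_neg (by simp)]
    · rw [if_neg hr, if_neg (by simp only [List.length_cons, gt_iff_lt, not_lt] at hr ⊢; omega)]

lemma takeWhile_dropWhile_nil (p : Int → Bool) (l : List Int) :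
    (l.dropWhile p).takeWhile p = [] := by
  induction l with
  | nil => rfl
  | cons a l ih =>
    rw [List.dropWhile_cons]
    split
    · exact ih
    · rename_i h
      simp only [Bool.not_eq_true] at h
      simp [h]

-- B = gRef
lemma foldl_runStep_eq_gRef (p : Int → Bool) :
    ∀ (n : Nat) (xs : List Int), xs.length ≤ n → ∀ best : List Int,
      (List.foldl (runStep p) (best, []) xs).1 = gRef p xs best := by
  intro n
  induction n with
  | zero =>
    intro xs hxs best
    have : xs = [] := by
      cases xs with
      | nil => rfl
      | cons _ _ => simp at hxs
    subst this; rfl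
  | succ n ih =>
    intro xs hxs best
    cases hxsc : xs with
    | nil => rfl
    | cons x xs' =>
      subst hxsc
      cases hx : p x with
      | false =>
        rw [List.foldl_cons]
        have hstep : runStep p (best, []) x = (best, []) := by
          rw [runStep, if_neg (by simp [hx])]
        rw [hstep, ih xs' (by simp at hxs; omega) best]
        rw [gRef]
        have htw : (x :: xs').takeWhile p = [] := by simp [hx]
        rw [htw]
        simp
      | true =>
        have hxsdec : x :: xs' = (x :: xs').takeWhile p ++ (x :: xs').dropWhile p :=
          (List.takeWhile_append_dropWhile).symm
        have hc : (x :: xs').takeWhile p = x :: xs'.takeWhile p := by simp [hx]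
        have hcval : ∀ y ∈ (x :: xs').takeWhile p, p y = true :=
          fun y hy => List.mem_takeWhile_imp hy
        have hysnil : ((x :: xs').dropWhile p).takeWhile p = [] :=
          takeWhile_dropWhile_nil p _
        have hlens : ((x :: xs').takeWhile p).length + ((x :: xs').dropWhile p).length
            = xs'.length + 1 := by
          have hl := congrArg List.length hxsdec
          simp only [List.length_cons, List.length_append] at hl
          omega
        conv_lhs => rw [hxsdec]
        conv_rhs => rw [hxsdec]
        rw [List.foldl_append,
          foldl_runStep_valid p _ best [] hcval (by simp),
          gRef_valid_block p _ _ best hcval hysnil]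
        have hbest' :
            (if best.length < List.length ([] : List Int) + ((x :: xs').takeWhile p).length
             then [] ++ (x :: xs').takeWhile p else best)
            = (if ((x :: xs').takeWhile p).length > best.length
               then (x :: xs').takeWhile p else best) := by
          simp
        rw [hbest']
        set best' := (if ((x :: xs').takeWhile p).length > best.length
               then (x :: xs').takeWhile p else best) with hbdef
        cases hys : (x :: xs').dropWhile p with
        | nil => rfl
        | cons y t =>
          have hyf : p y = false := by
            rw [hys] at hysnil
            by_contra hyt
            simp only [Bool.not_eq_false] at hyt
            simp [hyt] at hysnil
          rw [List.foldl_cons]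
          have hstep : runStep p (best', [] ++ (x :: xs').takeWhile p) y = (best', []) := by
            rw [runStep, if_neg (by simp [hyf])]
          rw [hstep]
          have htlen : t.length ≤ n := by
            rw [hys] at hlens
            have hclen : 1 ≤ ((x :: xs').takeWhile p).length := by rw [hc]; simp
            simp only [List.length_cons] at hlens hxs
            omega
          rw [ih t htlen best']
          rw [gRef]
          have htw2 : (y :: t).takeWhile p = [] := by simp [hyf]
          rw [htw2]
          simp

-- A's inner fold (over pyRange) is winFold
lemma inner_eq_winFold (lst : List Int) (p : Int → Bool) (left : Int) (hleft : 0 ≤ left) :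
    ∀ (cnt j : Nat) (r : List Int), ((lst.length : Int) - (left + j)).toNat = cnt →
      (PySem.List.pyRange (left + (j : Int)) (lst.length : Int) 1).foldl
        (fun result right =>
          let window := PySem.List.slice lst (some left) (some (right + 1))
          let all_powers_of_k := window.all p
          if all_powers_of_k = true then
            if right - left + 1 > (result.length : Int) then window else result
          else result) r
      = winFold p (lst.drop left.toNat) cnt j r := by
  intro cnt
  induction cnt with
  | zero =>
    intro j r hcnt
    rw [PySem.List.pyRange_one_eq_nil (by omega)]
    rfl
  | succ cnt ih =>
    intro j r hcnt
    have hlt : left + (j : Int) < (lst.length : Int) := by omega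
    rw [PySem.List.pyRange_one_cons hlt, List.foldl_cons, winFold]
    have hltn : ((left.toNat : Int)) = left := Int.toNat_of_nonneg hleft
    have hwin : PySem.List.slice lst (some left) (some (left + (j : Int) + 1)) =
        (lst.drop left.toNat).take (j + 1) := by
      have := PySem.List.slice_natCast_add (xs := lst) (j := left.toNat) (n := j + 1)
      rw [hltn] at this
      rw [← this]
      congr 1
      push_cast
      ring_nf
    have hcond : (left + (j : Int) - left + 1 > (r.length : Int)) = (j + 1 > r.length) := by
      simp only [eq_iff_iff]
      constructor <;> (intro; push_cast at *; omega)
    simp only [hwin, hcond]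
    have harg : left + (j : Int) + 1 = left + ((j + 1 : Nat) : Int) := by push_cast; ring
    rw [harg, ih (j + 1) _ (by push_cast at hcnt ⊢; omega)]

-- A = gRef
lemma outer_eq_gRef (lst : List Int) (p : Int → Bool) :
    ∀ (n : Nat) (a : Int), 0 ≤ a → ((lst.length : Int) - a).toNat = n → ∀ r : List Int,
      (PySem.List.pyRange a (lst.length : Int) 1).foldl
        (fun result left =>
          (PySem.List.pyRange left (lst.length : Int) 1).foldl
            (fun result right =>
              let window := PySem.List.slice lst (some left) (some (right + 1))
              let all_powers_of_k := window.all p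
              if all_powers_of_k = true then
                if right - left + 1 > (result.length : Int) then window else result
              else result) result) r
      = gRef p (lst.drop a.toNat) r := by
  intro n
  induction n with
  | zero =>
    intro a ha hn r
    rw [PySem.List.pyRange_one_eq_nil (by omega), List.foldl_nil,
      List.drop_eq_nil_of_le (by omega)]
    rfl
  | succ n ih =>
    intro a ha hn r
    have hlt : a < (lst.length : Int) := by omega
    have hlt' : a.toNat < lst.length := by omega
    rw [PySem.List.pyRange_one_cons hlt, List.foldl_cons]
    have hinner := inner_eq_winFold lst p a ha ((lst.length : Int) - a).toNat 0 r
      (by push_cast; omega)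
    simp only [Nat.cast_zero, add_zero] at hinner
    rw [hinner]
    have hslen : (lst.drop a.toNat).length = ((lst.length : Int) - a).toNat := by
      simp; omega
    rw [winFold_spec p _ _ 0 r (by omega)]
    have hdrop : lst.drop a.toNat = lst[a.toNat] :: lst.drop (a.toNat + 1) :=
      List.drop_eq_getElem_cons hlt'
    conv_rhs => rw [hdrop, gRef, ← hdrop]
    have hanat : (a + 1).toNat = a.toNat + 1 := by omega
    rw [← hanat, ← ih (a + 1) (by omega) (by omega)]
    congr 1
    by_cases hcl : ((lst.drop a.toNat).takeWhile p).length > r.length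
    · rw [if_pos ⟨by omega, hcl⟩, if_pos hcl]
    · rw [if_neg (by tauto), if_neg hcl]

lemma bStep_eq_runStep (k : Int) :
    bStep k = runStep (fun num => !(get_power_of_k num k == 0)) := by
  funext st num
  rw [bStep, runStep]
  simp only [pred_eq]

-- ===== VERDICT (by name: the statement is the Claim_ definition above) =====
theorem get_longest_powers_of_k_spec : Claim_equal_get_longest_powers_of_k := by
  intro lst k _
  unfold Spec_get_longest_powers_of_k
  unfold get_longest_powers_of_k get_longest_powers_of_k_alt
  rw [bStep_eq_runStep k]
  rw [foldl_runStep_eq_gRef _ lst.length lst (le_refl _) []]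
  have h := outer_eq_gRef lst (fun num => !(get_power_of_k num k == 0))
    ((lst.length : Int) - 0).toNat 0 (le_refl _) rfl []
  simp only [Int.toNat_zero, List.drop_zero] at h
  exact h
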